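-- pv_equiv track=rewrite | github.com/paramesh-sankati/DSA-practice | TOP 100 MOST ASKED/MinStepsToMatchRotatedStrs.py | left_rotate
-- ===== SOURCE A (Python) =====
-- def left_rotate(s1,s2):
--     cnt=0
--     for i in range(len(s1)-1):
--         t=s1[i+1:]+s1[:i+1]
--         cnt+=1
--         if t==s2:
--             break
--     return cnt
-- ===== SOURCE B (Python) =====
-- def left_rotate(s1, s2):
--     n = len(s1)
--     if n <= 1:
--         return 0
--     if len(s2) == n:
--         k = (s1 + s1).find(s2, 1)
--         if 1 <= k <= n - 1:
--             return k
--     return n - 1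
-- ===== Notes on version B (the rewrite author's own statement) =====
-- stated objective: faster
-- what changed: Replaces the loop that rebuilds and compares every rotation (O(n^2)) by a single substring search of s2 in s1+s1 starting at index 1, clamped to the rotation range.
import Mathlib
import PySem

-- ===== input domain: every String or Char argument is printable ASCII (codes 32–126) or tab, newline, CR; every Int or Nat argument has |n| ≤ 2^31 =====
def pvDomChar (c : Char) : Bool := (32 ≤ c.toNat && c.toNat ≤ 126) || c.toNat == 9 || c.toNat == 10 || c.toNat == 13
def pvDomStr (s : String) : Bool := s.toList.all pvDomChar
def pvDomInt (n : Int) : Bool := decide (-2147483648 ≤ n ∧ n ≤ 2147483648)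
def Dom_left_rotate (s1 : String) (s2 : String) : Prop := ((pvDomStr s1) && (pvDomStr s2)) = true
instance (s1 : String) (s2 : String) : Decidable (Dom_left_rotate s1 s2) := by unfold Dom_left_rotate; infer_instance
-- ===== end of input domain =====

-- B replaces A's quadratic rotate-and-compare loop by one substring search of s2 in s1+s1 (objective: faster).

-- ===== PORT A =====
-- A's 'for i in range(len(s1)-1)' with break, ported as structural recursion over the range list
def pvALoop (L S : List Char) : List Int → Int → Int
  | [], cnt => cnt
  | i :: rest, cnt =>
      -- t = s1[i+1:] + s1[:i+1]; cnt += 1; if t == s2: break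
      let t := PySem.List.slice L (some (i + 1)) none ++ PySem.List.slice L none (some (i + 1))
      if t == S then cnt + 1 else pvALoop L S rest (cnt + 1)

def left_rotate (s1 : String) (s2 : String) : Int :=
  pvALoop s1.toList s2.toList (PySem.List.pyRange 0 (PySem.Str.len s1 - 1)) 0

-- ===== PORT B =====
def left_rotate_alt (s1 : String) (s2 : String) : Int :=
  let n : Int := PySem.Str.len s1
  if n ≤ 1 then 0
  else if PySem.Str.len s2 = n then
    -- k = (s1 + s1).find(s2, 1)
    let k := PySem.Chars.findFrom (s1.toList ++ s1.toList) s2.toList 1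
    if 1 ≤ k ∧ k ≤ n - 1 then k else n - 1
  else n - 1

-- ===== PRECONDITION & SPEC =====
def Spec_left_rotate (s1 : String) (s2 : String) (out : Int) : Prop := out = left_rotate_alt s1 s2
instance (s1 : String) (s2 : String) (out : Int) : Decidable (Spec_left_rotate s1 s2 out) := by unfold Spec_left_rotate; infer_instance

-- ===== CLAIM (what is proved, stated in full; the proofs are below) =====
def Claim_equal_left_rotate : Prop := ∀ (s1 : String) (s2 : String), Dom_left_rotate s1 s2 → Spec_left_rotate s1 s2 (left_rotate s1 s2)

-- ===== LEMMAS AND PROOFS =====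

-- rotation of L by k, and the value both programs compute (for L.length ≥ 1)
def pvRot (L : List Char) (k : Nat) : List Char := L.drop k ++ L.take k

def pvCommon (L S : List Char) : Int :=
  match (List.range' 1 (L.length - 1)).find? (fun k => pvRot L k == S) with
  | some k => (k : Int)
  | none => (L.length : Int) - 1

theorem pvPyRange_nil {a b : Int} (h : b ≤ a) : PySem.List.pyRange a b = [] := by
  apply List.eq_nil_iff_forall_not_mem.mpr
  intro x hx
  rw [PySem.List.mem_pyRange_one] at hx
  omega

theorem pvFind?_range'_some (p : Nat → Bool) (k : Nat) :
    ∀ (len s : Nat), s ≤ k → k < s + len → p k = true →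
      (∀ j, s ≤ j → j < k → p j = false) → (List.range' s len).find? p = some k := by
  intro len
  induction len with
  | zero => intro s h1 h2 _ _; omega
  | succ m ih =>
      intro s h1 h2 hp hmin
      rw [List.range'_succ, List.find?_cons]
      by_cases hsk : s = k
      · subst hsk; simp [hp]
      · have : p s = false := hmin s le_rfl (by omega)
        simp only [this]
        exact ih (s + 1) (by omega) (by omega) hp (fun j hj1 hj2 => hmin j (by omega) hj2)

theorem pvALoop_eq (L S : List Char) :
    ∀ (len a : Nat),
      pvALoop L S (PySem.List.pyRange (a : Int) ((a : Int) + (len : Int))) (a : Int) =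
        match (List.range' (a + 1) len).find? (fun k => pvRot L k == S) with
        | some k => (k : Int)
        | none => ((a + len : Nat) : Int) := by
  intro len
  induction len with
  | zero =>
      intro a
      rw [pvPyRange_nil (by omega)]
      simp [pvALoop]
  | succ m ih =>
      intro a
      rw [PySem.List.pyRange_one_cons (by omega), List.range'_succ]
      simp only [pvALoop]
      have hidx : (a : Int) + 1 = ((a + 1 : Nat) : Int) := by push_cast; ring
      rw [hidx, PySem.List.slice_from_natCast, PySem.List.slice_to_natCast]
      by_cases hp : (List.drop (a + 1) L ++ List.take (a + 1) L == S) = true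
      · rw [if_pos hp, List.find?_cons_of_pos (by simpa [pvRot] using hp)]
      · rw [if_neg hp, List.find?_cons_of_neg (by simpa [pvRot] using hp)]
        have harg : (a : Int) + ((m + 1 : Nat) : Int) = ((a + 1 : Nat) : Int) + (m : Int) := by
          push_cast; ring
        rw [harg, ih (a + 1), show a + 1 + m = a + (m + 1) from by omega]

-- A computes pvCommon (for nonempty s1)
theorem pvA_eq_common (L S : List Char) (hL : 1 ≤ L.length) :
    pvALoop L S (PySem.List.pyRange 0 ((L.length : Int) - 1)) 0 = pvCommon L S := by
  have h0 : ((L.length : Int) - 1) = ((0 : Nat) : Int) + ((L.length - 1 : Nat) : Int) := by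
    push_cast [Nat.cast_sub hL]; ring
  have := pvALoop_eq L S (L.length - 1) 0
  rw [h0]
  simpa [pvCommon, Nat.cast_sub hL] using this

-- rotation-by-k as a prefix of (L ++ L) dropped by k
theorem pvPrefix_iff_rot (L S : List Char) (hS : S.length = L.length) (k : Nat)
    (hk : k ≤ L.length) :
    (S <+: (L ++ L).drop k) ↔ pvRot L k = S := by
  have hdrop : (L ++ L).drop k = L.drop k ++ L := by
    rw [List.drop_append]
    have : k - L.length = 0 := by omega
    rw [this, List.drop_zero]
  rw [hdrop, List.prefix_iff_eq_take, hS]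
  have htake : List.take L.length (L.drop k ++ L) = pvRot L k := by
    rw [List.take_append]
    have h1 : (List.drop k L).length = L.length - k := by simp
    have h2 : List.take L.length (List.drop k L) = List.drop k L := by
      apply List.take_of_length_le; omega
    rw [h2, h1]
    have : L.length - (L.length - k) = k := by omega
    rw [this]; rfl
  rw [htake, eq_comm]

theorem pvRot_length (L : List Char) (k : Nat) (hk : k ≤ L.length) :
    (pvRot L k).length = L.length := by
  simp [pvRot]; omega

-- no rotation matches at all: the search over [1, n-1] comes up empty
theorem pvFind_none (L S : List Char)
    (h : ∀ k, 1 ≤ k → k < L.length → pvRot L k ≠ S) :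
    (List.range' 1 (L.length - 1)).find? (fun k => pvRot L k == S) = none := by
  rw [List.find?_eq_none]
  intro k hkmem
  rw [List.mem_range'_1] at hkmem
  simp only [beq_iff_eq]
  exact h k (by omega) (by omega)

-- B computes pvCommon (for s1 of length ≥ 2)
theorem pvB_eq_common (s1 s2 : String) (h2 : 2 ≤ s1.toList.length) :
    left_rotate_alt s1 s2 = pvCommon s1.toList s2.toList := by
  have h1cast : ((1 : Nat) : Int) = (1 : Int) := by norm_num
  simp only [left_rotate_alt, PySem.Str.len_eq]
  rw [if_neg (by exact_mod_cast (by omega : ¬ ((s1.toList.length : Int) ≤ 1)))]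
  by_cases hlen : s2.toList.length = s1.toList.length
  · rw [if_pos (by exact_mod_cast hlen)]
    have hlen2n : (1 : Nat) ≤ (s1.toList ++ s1.toList).length := by rw [List.length_append]; omega
    by_cases hneg : PySem.Chars.findFrom (s1.toList ++ s1.toList) s2.toList 1 = -1
    · -- find returned -1: s2 occurs nowhere at index ≥ 1, so no rotation matches
      have hno : ¬ s2.toList <:+: (s1.toList ++ s1.toList).drop 1 := by
        apply (PySem.Chars.findFrom_natCast_eq_neg_one_iff (s1.toList ++ s1.toList)
          s2.toList 1 hlen2n).mp
        rw [h1cast]; exact hneg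
      have hfind := pvFind_none s1.toList s2.toList (by
        intro k hk1 hkn hrot
        apply hno
        have hpre : s2.toList <+: (s1.toList ++ s1.toList).drop k :=
          (pvPrefix_iff_rot s1.toList s2.toList hlen k (by omega)).mpr hrot
        have hsuf : (s1.toList ++ s1.toList).drop k <:+ (s1.toList ++ s1.toList).drop 1 := by
          rw [show k = 1 + (k - 1) from by omega, ← List.drop_drop]
          exact List.drop_suffix _ _
        exact hpre.isInfix.trans hsuf.isInfix)
      rw [pvCommon, hfind, if_neg (by rw [hneg]; omega)]
    · -- find returned the first occurrence f ≥ 1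
      have hspec := PySem.Chars.findFrom_natCast_spec (s1.toList ++ s1.toList)
        s2.toList 1 hlen2n (by rw [h1cast]; exact hneg)
      rw [h1cast] at hspec
      obtain ⟨hge1, hpre, hmin⟩ := hspec
      set f := PySem.Chars.findFrom (s1.toList ++ s1.toList) s2.toList 1 with hf
      have hflen : f.toNat ≤ s1.toList.length := by
        have hl := hpre.length_le
        simp only [List.length_drop, List.length_append, hlen] at hl
        omega
      by_cases hle : f ≤ (s1.toList.length : Int) - 1
      · rw [if_pos ⟨hge1, hle⟩]
        have hftn : ((f.toNat : Nat) : Int) = f := Int.toNat_of_nonneg (by omega)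
        have hfind : (List.range' 1 (s1.toList.length - 1)).find?
            (fun k => pvRot s1.toList k == s2.toList) = some f.toNat := by
          apply pvFind?_range'_some _ f.toNat
          · omega
          · omega
          · simp only [beq_iff_eq]
            exact (pvPrefix_iff_rot s1.toList s2.toList hlen f.toNat hflen).mp hpre
          · intro j hj1 hjlt
            simp only [beq_eq_false_iff_ne, ne_eq]
            intro hrot
            exact hmin j hj1 hjlt
              ((pvPrefix_iff_rot s1.toList s2.toList hlen j (by omega)).mpr hrot)
        rw [pvCommon, hfind]
        exact hftn.symm
      · rw [if_neg (by intro h; exact hle h.2)]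
        -- f = n: s2 = s1 itself, but no proper rotation matched
        have hfind := pvFind_none s1.toList s2.toList (by
          intro k hk1 hkn hrot
          exact hmin k hk1 (by omega)
            ((pvPrefix_iff_rot s1.toList s2.toList hlen k (by omega)).mpr hrot))
        rw [pvCommon, hfind]
  · -- len(s2) != len(s1): no rotation can equal s2
    rw [if_neg (by intro h; exact hlen (by exact_mod_cast h))]
    have hfind := pvFind_none s1.toList s2.toList (by
      intro k hk1 hkn hrot
      apply hlen
      rw [← hrot]
      exact pvRot_length s1.toList k (by omega))
    rw [pvCommon, hfind]

-- ===== VERDICT (by name: the statement is the Claim_ definition above) =====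
theorem left_rotate_spec : Claim_equal_left_rotate := by
  intro s1 s2 _
  unfold Spec_left_rotate
  set L := s1.toList with hLdef
  set S := s2.toList with hSdef
  by_cases h2 : 2 ≤ L.length
  · rw [pvB_eq_common s1 s2 h2]
    unfold left_rotate
    rw [PySem.Str.len_eq, ← hLdef, ← hSdef]
    exact pvA_eq_common L S (by omega)
  · -- n ≤ 1: A's range is empty, B takes the first branch; both return 0
    unfold left_rotate left_rotate_alt
    rw [PySem.Str.len_eq, PySem.Str.len_eq, ← hLdef]
    rw [pvPyRange_nil (by omega)]
    rw [if_pos (by exact_mod_cast (by omega : (L.length : Int) ≤ 1))]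
    rfl
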